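-- pv_equiv track=rewrite | github.com/LarsChrWiik/CE903-group6 | GUI/API/Balancer.py | balance_equal
-- ===== SOURCE A (Python) =====
-- def balance_equal(X, Y):
--     y_0 = [x for x in Y if x == 0]
--     y_1 = [x for x in Y if x == 1]
--
--     min_size = min(len(y_0), len(y_1))
--
--     X_new = []
--     x_counter = 0
--     Y_new = []
--     y_counter = 0
--     for i in range(len(X)):
--         if Y[i] == 0 and x_counter < min_size:
--             X_new.append(X[i])
--             Y_new.append(Y[i])
--             x_counter += 1
--         elif Y[i] == 1 and y_counter < min_size:
--             X_new.append(X[i])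
--             Y_new.append(Y[i])
--             y_counter += 1
--
--     return X_new, Y_new
-- ===== SOURCE B (Python) =====
-- def balance_equal(X, Y):
--     min_size = min(Y.count(0), Y.count(1))
--     zero_idx = [i for i in range(len(X)) if Y[i] == 0][:min_size]
--     one_idx = [i for i in range(len(X)) if Y[i] == 1][:min_size]
--     keep = sorted(zero_idx + one_idx)
--     return [X[i] for i in keep], [Y[i] for i in keep]
-- ===== Notes on version B (the rewrite author's own statement) =====
-- stated objective: alternative
-- what changed: Replaces the single interleaved counter-pass with an index-table-then-gather decomposition: build the kept index lists for each class (truncated to the minority count), merge them with a sort, and gather X and Y at those positions.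
import Mathlib
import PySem

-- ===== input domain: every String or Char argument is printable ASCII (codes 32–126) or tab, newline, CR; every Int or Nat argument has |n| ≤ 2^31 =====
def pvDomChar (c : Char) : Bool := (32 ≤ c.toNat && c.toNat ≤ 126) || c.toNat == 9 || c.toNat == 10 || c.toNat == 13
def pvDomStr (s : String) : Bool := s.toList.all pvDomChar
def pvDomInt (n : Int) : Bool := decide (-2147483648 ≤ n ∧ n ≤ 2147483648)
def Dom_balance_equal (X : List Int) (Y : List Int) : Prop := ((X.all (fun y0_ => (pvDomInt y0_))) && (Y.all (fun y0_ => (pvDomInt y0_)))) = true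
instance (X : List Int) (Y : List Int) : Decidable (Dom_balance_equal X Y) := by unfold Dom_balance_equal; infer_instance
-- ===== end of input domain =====

-- B replaces A's single interleaved counter-pass by an index-table-then-gather decomposition
-- (per-class kept index lists, merged by a sort, then gathered); objective: alternative.

-- ===== PORT A =====
-- one loop step of A: the two elif branches over the state (X_new, x_counter, Y_new, y_counter)
def pvStepA (X Y : List Int) (m : Nat) (st : List Int × Nat × List Int × Nat) (i : Nat) :
    List Int × Nat × List Int × Nat :=
  if Y.getD i 0 == 0 && decide (st.2.1 < m) then
    (st.1 ++ [X.getD i 0], st.2.1 + 1, st.2.2.1 ++ [Y.getD i 0], st.2.2.2)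
  else if Y.getD i 0 == 1 && decide (st.2.2.2 < m) then
    (st.1 ++ [X.getD i 0], st.2.1, st.2.2.1 ++ [Y.getD i 0], st.2.2.2 + 1)
  else st

def balance_equal (X : List Int) (Y : List Int) : List Int × List Int :=
  let y_0 := Y.filter (fun x => x == 0)
  let y_1 := Y.filter (fun x => x == 1)
  let min_size := min y_0.length y_1.length
  let s := (List.range X.length).foldl (pvStepA X Y min_size) ([], 0, [], 0)
  (s.1, s.2.2.1)

-- ===== PORT B =====
def balance_equal_alt (X : List Int) (Y : List Int) : List Int × List Int :=
  let min_size := min (PySem.List.count Y 0) (PySem.List.count Y 1)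
  let zero_idx := ((List.range X.length).filter (fun i => Y.getD i 0 == 0)).take min_size
  let one_idx := ((List.range X.length).filter (fun i => Y.getD i 0 == 1)).take min_size
  let keep := PySem.List.sorted (zero_idx ++ one_idx) (fun i => i)
  (keep.map (fun i => X.getD i 0), keep.map (fun i => Y.getD i 0))

-- ===== PRECONDITION & SPEC =====
-- Python A indexes Y[i] for every i < len(X), so it raises IndexError when len(Y) < len(X);
-- Pre_ excludes exactly those inputs (B raises there too).
def Pre_balance_equal (X : List Int) (Y : List Int) : Prop := X.length ≤ Y.length
instance (X : List Int) (Y : List Int) : Decidable (Pre_balance_equal X Y) := by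
  unfold Pre_balance_equal; infer_instance

def pvWitness_balance_equal : List Int × List Int := ([10, 20, 30], [0, 1, 1])

def Spec_balance_equal (X : List Int) (Y : List Int) (out : List Int × List Int) : Prop :=
  out = balance_equal_alt X Y
instance (X : List Int) (Y : List Int) (out : List Int × List Int) :
    Decidable (Spec_balance_equal X Y out) := by unfold Spec_balance_equal; infer_instance

-- ===== CLAIM (what is proved, stated in full; the proofs are below) =====
def Claim_equal_balance_equal : Prop := ∀ (X : List Int) (Y : List Int),
  Dom_balance_equal X Y → Pre_balance_equal X Y → Spec_balance_equal X Y (balance_equal X Y)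

-- ===== LEMMAS AND PROOFS =====

-- kept-index predicate: position i is kept for class-test p if p i holds and fewer than m
-- earlier positions already passed p
def pvQ (p : Nat → Bool) (m : Nat) : Nat → Bool :=
  fun i => p i && decide (((List.range i).filter p).length < m)

-- truncating a filtered range is filtering with the rank bound
lemma pv_take_filter_range (p : Nat → Bool) (m n : Nat) :
    ((List.range n).filter p).take m = (List.range n).filter (pvQ p m) := by
  induction n with
  | zero => simp
  | succ n ih =>
    rw [List.range_succ, List.filter_append, List.filter_append, List.take_append, ih]
    by_cases hp : p n
    · by_cases hm : ((List.range n).filter p).length < m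
      · have h1 : m - ((List.range n).filter p).length = (m - ((List.range n).filter p).length - 1) + 1 := by omega
        rw [h1]
        simp [pvQ, hp, hm]
      · have h1 : m - ((List.range n).filter p).length = 0 := by omega
        rw [h1]
        simp [pvQ, hp, hm]
    · simp [pvQ, hp]

-- filtering a disjunction of disjoint tests is (up to order) the two filters concatenated
lemma pv_filter_or_perm (a b : Nat → Bool) (l : List Nat)
    (h : ∀ i, ¬(a i = true ∧ b i = true)) :
    (l.filter (fun i => a i || b i)).Perm (l.filter a ++ l.filter b) := by
  induction l with
  | nil => simp
  | cons x t ih =>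
    cases hax : a x <;> cases hbx : b x
    · simpa [List.filter_cons, hax, hbx] using ih
    · simp only [List.filter_cons, hax, hbx, Bool.false_or, if_true]
      exact (ih.cons x).trans List.perm_middle.symm
    · simpa [List.filter_cons, hax, hbx] using ih.cons x
    · exact absurd ⟨hax, hbx⟩ (h x)

-- loop invariant for A: after processing range n, the lists are the gather over the kept
-- indices and each counter is the capped rank of its class
lemma pv_loopA (X Y : List Int) (m n : Nat) :
    (List.range n).foldl (pvStepA X Y m) ([], 0, [], 0) =
      (((List.range n).filter (fun i => pvQ (fun j => Y.getD j 0 == 0) m i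
            || pvQ (fun j => Y.getD j 0 == 1) m i)).map (fun i => X.getD i 0),
       min (((List.range n).filter (fun j => Y.getD j 0 == 0)).length) m,
       ((List.range n).filter (fun i => pvQ (fun j => Y.getD j 0 == 0) m i
            || pvQ (fun j => Y.getD j 0 == 1) m i)).map (fun i => Y.getD i 0),
       min (((List.range n).filter (fun j => Y.getD j 0 == 1)).length) m) := by
  induction n with
  | zero => simp
  | succ n ih =>
    rw [List.range_succ, List.foldl_append, ih]
    simp only [List.foldl_cons, List.foldl_nil]
    by_cases h0 : Y[n]?.getD 0 = (0 : Int)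
    · have h1 : ¬ Y[n]?.getD 0 = (1 : Int) := by omega
      by_cases hm : (List.filter (fun j => Y[j]?.getD 0 == 0) (List.range n)).length < m
      · have c1 : min (List.filter (fun j => Y[j]?.getD 0 == 0) (List.range n)).length m < m := by omega
        have c2 : min ((List.filter (fun j => Y[j]?.getD 0 == 0) (List.range n)).length + 1) m
            = min (List.filter (fun j => Y[j]?.getD 0 == 0) (List.range n)).length m + 1 := by omega
        simp [pvStepA, pvQ, h0, h1, c1, hm, c2, List.filter_append]
        omega
      · have c1 : ¬ min (List.filter (fun j => Y[j]?.getD 0 == 0) (List.range n)).length m < m := by omega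
        have c2 : min ((List.filter (fun j => Y[j]?.getD 0 == 0) (List.range n)).length + 1) m
            = min (List.filter (fun j => Y[j]?.getD 0 == 0) (List.range n)).length m := by omega
        simp [pvStepA, pvQ, h0, h1, c1, hm, c2, List.filter_append]
    · by_cases h1 : Y[n]?.getD 0 = (1 : Int)
      · by_cases hm : (List.filter (fun j => Y[j]?.getD 0 == 1) (List.range n)).length < m
        · have c1 : min (List.filter (fun j => Y[j]?.getD 0 == 1) (List.range n)).length m < m := by omega
          have c2 : min ((List.filter (fun j => Y[j]?.getD 0 == 1) (List.range n)).length + 1) m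
              = min (List.filter (fun j => Y[j]?.getD 0 == 1) (List.range n)).length m + 1 := by omega
          simp [pvStepA, pvQ, h0, h1, c1, hm, c2, List.filter_append]
          omega
        · have c1 : ¬ min (List.filter (fun j => Y[j]?.getD 0 == 1) (List.range n)).length m < m := by omega
          have c2 : min ((List.filter (fun j => Y[j]?.getD 0 == 1) (List.range n)).length + 1) m
              = min (List.filter (fun j => Y[j]?.getD 0 == 1) (List.range n)).length m := by omega
          simp [pvStepA, pvQ, h0, h1, c1, hm, c2, List.filter_append]
      · simp [pvStepA, pvQ, h0, h1, List.filter_append]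

-- the merged kept-index list is sorted(zero_idx ++ one_idx)
lemma pv_keep_sorted (Y : List Int) (m n : Nat) :
    PySem.List.sorted
        (((List.range n).filter (fun i => Y.getD i 0 == 0)).take m
          ++ ((List.range n).filter (fun i => Y.getD i 0 == 1)).take m)
        (fun i => i) =
      (List.range n).filter (fun i => pvQ (fun j => Y.getD j 0 == 0) m i
          || pvQ (fun j => Y.getD j 0 == 1) m i) := by
  apply PySem.List.sorted_eq_of_perm_of_pairwise_lt
  · rw [pv_take_filter_range, pv_take_filter_range]
    apply pv_filter_or_perm
    rintro i ⟨ha, hb⟩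
    simp only [pvQ, Bool.and_eq_true, beq_iff_eq] at ha hb
    omega
  · exact List.Pairwise.sublist List.filter_sublist List.pairwise_lt_range

-- A's min_size equals B's min_size
lemma pv_min_size (Y : List Int) :
    min (Y.filter (fun x => x == 0)).length (Y.filter (fun x => x == 1)).length
      = min (PySem.List.count Y 0) (PySem.List.count Y 1) := by
  rw [PySem.List.count_eq, PySem.List.count_eq, List.count_eq_countP, List.count_eq_countP,
    List.countP_eq_length_filter, List.countP_eq_length_filter]

-- ===== VERDICT (by name: the statement is the Claim_ definition above) =====
theorem balance_equal_spec : Claim_equal_balance_equal := by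
  intro X Y _ _
  unfold Spec_balance_equal balance_equal balance_equal_alt
  simp only [pv_min_size, pv_keep_sorted, pv_loopA]
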